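-- pv_equiv track=rewrite | github.com/victorasido/WPS | services/detector_service.py | _best_matching_line
-- ===== SOURCE A (Python) =====
-- def _best_matching_line(keyword: str, cell_text: str) -> str:
--     """
--     Ekstrak baris paling relevan dari cell_text terhadap keyword.
--
--     Cell bisa mengandung banyak baris — misalnya:
--         "Developer\nFarino Joshua\nPT. Bank Negara Indonesia"
--
--     Fungsi ini return baris yang mengandung keyword, bukan full cell text.
--     Fallback ke baris pertama non-kosong jika tidak ada baris yang match.
--
--     Contoh:
--         keyword="Farino", cell="Farino Joshua"         → "Farino Joshua"
--         keyword="Division Head", cell="Division Head\nDivisi IT\nPT. BNI"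
--                                                         → "Division Head"
--         keyword="Manager", cell="Approval\nManager Keuangan\nPT. BNI"
--                                                         → "Manager Keuangan"
--     """
--     lines = [l.strip() for l in cell_text.splitlines() if l.strip()]
--     if not lines:
--         return keyword
--
--     kw_lower = keyword.lower()
--
--     # Prioritas 1: baris yang mengandung keyword persis (case-insensitive)
--     for line in lines:
--         if kw_lower in line.lower():
--             return line
--
--     # Prioritas 2: baris yang mengandung kata terbanyak dari keyword
--     kw_words = kw_lower.split()
--     best_line  = lines[0]
--     best_score = 0
--     for line in lines:
--         score = sum(1 for w in kw_words if w in line.lower())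
--         if score > best_score:
--             best_score = score
--             best_line  = line
--
--     return best_line
-- ===== SOURCE B (Python) =====
-- def _best_matching_line(keyword: str, cell_text: str) -> str:
--     # Single fused pass over the raw lines: strip/skip-empty inline, keep a
--     # running best (line, rank) pair, and return immediately on the first
--     # substring match (which outranks any word-overlap score).
--     kw_lower = keyword.lower()
--     kw_words = kw_lower.split()
--     best = None  # (line, rank) of the best non-matching line so far
--     for raw in cell_text.splitlines():
--         line = raw.strip()
--         if not line:
--             continue
--         low = line.lower()
--         if kw_lower in low:
--             return line
--         r = sum(1 for w in kw_words if w in low)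
--         if best is None or best[1] < r:
--             best = (line, r)
--     return keyword if best is None else best[0]
-- ===== Notes on version B (the rewrite author's own statement) =====
-- stated objective: alternative
-- what changed: Replaced A's staged pipeline (build a stripped non-empty line list, then a substring-match scan, then a separate best-score scan) by one fused pass over the raw lines that strips inline, returns early on the first substring match, and otherwise keeps a running (line, score) argmax in an Option accumulator.
import Mathlib
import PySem

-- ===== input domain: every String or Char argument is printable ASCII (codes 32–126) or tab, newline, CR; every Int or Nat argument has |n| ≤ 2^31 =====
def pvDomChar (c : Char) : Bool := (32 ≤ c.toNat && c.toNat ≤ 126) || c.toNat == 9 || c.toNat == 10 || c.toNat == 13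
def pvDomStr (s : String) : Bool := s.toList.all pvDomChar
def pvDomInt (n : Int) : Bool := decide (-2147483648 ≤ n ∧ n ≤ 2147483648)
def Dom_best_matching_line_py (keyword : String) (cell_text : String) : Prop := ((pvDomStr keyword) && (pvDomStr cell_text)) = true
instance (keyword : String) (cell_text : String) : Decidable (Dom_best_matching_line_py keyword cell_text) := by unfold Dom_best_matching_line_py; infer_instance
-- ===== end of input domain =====

-- B replaces A's staged pipeline (line list, substring scan, best-score scan) by one fused
-- pass over the raw lines with an Option accumulator and early return on a substring match.

-- ===== PORT A =====
def best_matching_line_py (keyword : String) (cell_text : String) : String :=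
  let lines := ((PySem.Str.splitlines cell_text).filter
      (fun l => PySem.Str.strip l ≠ "")).map PySem.Str.strip
  match lines with
  | [] => keyword
  | l0 :: _ =>
    let kw_lower := PySem.Str.lower keyword
    -- Prioritas 1: first line containing the keyword (case-insensitive)
    match lines.find? (fun line => PySem.Str.isIn kw_lower (PySem.Str.lower line)) with
    | some line => line
    | none =>
      -- Prioritas 2: line with the most keyword words
      let kw_words := PySem.Str.split₀ kw_lower
      let best := lines.foldl
        (fun (st : String × Int) line =>
          let score : Int :=
            ((kw_words.map (fun w => if PySem.Str.isIn w (PySem.Str.lower line) then (1 : Int) else 0)).sum)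
          if st.2 < score then (line, score) else st)
        (l0, 0)
      best.1

-- ===== PORT B =====
-- the fused loop of Source B: raw lines in, running best (line, rank) Option, early return
def bmlLoop (kwl : String) (ws : List String) (kw : String) :
    List String → Option (String × Int) → String
  | [], none => kw
  | [], some b => b.1
  | raw :: t, best =>
    let line := PySem.Str.strip raw
    if line = "" then bmlLoop kwl ws kw t best
    else
      let low := PySem.Str.lower line
      if PySem.Str.isIn kwl low then line
      else
        let r : Int := ((ws.map (fun w => if PySem.Str.isIn w low then (1 : Int) else 0)).sum)
        match best with
        | none => bmlLoop kwl ws kw t (some (line, r))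
        | some b => if b.2 < r then bmlLoop kwl ws kw t (some (line, r)) else bmlLoop kwl ws kw t (some b)

def best_matching_line_py_alt (keyword : String) (cell_text : String) : String :=
  let kw_lower := PySem.Str.lower keyword
  let kw_words := PySem.Str.split₀ kw_lower
  bmlLoop kw_lower kw_words keyword (PySem.Str.splitlines cell_text) none

-- ===== PRECONDITION & SPEC =====
def Spec_best_matching_line_py (keyword : String) (cell_text : String) (out : String) : Prop := out = best_matching_line_py_alt keyword cell_text
instance (keyword : String) (cell_text : String) (out : String) : Decidable (Spec_best_matching_line_py keyword cell_text out) := by unfold Spec_best_matching_line_py; infer_instance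

-- ===== CLAIM (what is proved, stated in full; the proofs are below) =====
def Claim_equal_best_matching_line_py : Prop := ∀ (keyword : String) (cell_text : String), Dom_best_matching_line_py keyword cell_text → Spec_best_matching_line_py keyword cell_text (best_matching_line_py keyword cell_text)

-- ===== LEMMAS AND PROOFS =====

-- proof-side abbreviations: A's score-fold step, the contains test, the word-overlap score
def pvStepA (s : String → Int) : (String × Int) → String → (String × Int) :=
  fun st x => if st.2 < s x then (x, s x) else st

def pvContains (kwl : String) : String → Bool :=
  fun line => PySem.Str.isIn kwl (PySem.Str.lower line)

def pvScore (ws : List String) : String → Int :=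
  fun line => ((ws.map (fun w => if PySem.Str.isIn w (PySem.Str.lower line) then (1 : Int) else 0)).sum)

-- B's loop restricted to already-stripped non-empty lines
def pvClean (kwl : String) (ws : List String) (kw : String) :
    List String → Option (String × Int) → String
  | [], none => kw
  | [], some b => b.1
  | line :: t, best =>
    if pvContains kwl line then line
    else
      match best with
      | none => pvClean kwl ws kw t (some (line, pvScore ws line))
      | some b => if b.2 < pvScore ws line then pvClean kwl ws kw t (some (line, pvScore ws line))
                  else pvClean kwl ws kw t (some b)

-- stripping/skipping empties inline equals running on the cleaned line list
lemma pv_bmlLoop_clean (kwl : String) (ws : List String) (kw : String) (rs : List String)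
    (best : Option (String × Int)) :
    bmlLoop kwl ws kw rs best
      = pvClean kwl ws kw ((rs.filter (fun l => PySem.Str.strip l ≠ "")).map PySem.Str.strip) best := by
  induction rs generalizing best with
  | nil => cases best <;> rfl
  | cons raw t ih =>
    by_cases h : PySem.Str.strip raw = ""
    · rw [show (raw :: t).filter (fun l => PySem.Str.strip l ≠ "") = t.filter (fun l => PySem.Str.strip l ≠ "") by
        simp [h]]
      rw [show bmlLoop kwl ws kw (raw :: t) best = bmlLoop kwl ws kw t best from by
        simp [bmlLoop, h]]
      exact ih best
    · rw [show (raw :: t).filter (fun l => PySem.Str.strip l ≠ "")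
          = raw :: t.filter (fun l => PySem.Str.strip l ≠ "") from by simp [h]]
      simp only [List.map_cons, bmlLoop, pvClean, pvContains, pvScore, if_neg h]
      by_cases hc : PySem.Str.isIn kwl (PySem.Str.lower (PySem.Str.strip raw)) = true
      · rw [if_pos hc, if_pos hc]
      · rw [if_neg hc, if_neg hc]
        cases best with
        | none => exact ih _
        | some b =>
          dsimp only
          by_cases hlt : b.2 < (ws.map (fun w => if PySem.Str.isIn w (PySem.Str.lower (PySem.Str.strip raw)) then (1 : Int) else 0)).sum
          · rw [if_pos hlt, if_pos hlt]; exact ih _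
          · rw [if_neg hlt, if_neg hlt]; exact ih _

-- the word-overlap score is nonnegative
lemma pv_score_nonneg (ws : List String) (l : String) : 0 ≤ pvScore ws l := by
  unfold pvScore
  induction ws with
  | nil => simp
  | cons w t ih => simp only [List.map_cons, List.sum_cons]; split_ifs <;> omega

-- core invariant: with a stored non-matching line carrying its own score, B's clean loop
-- equals A's find?-then-best-score decomposition
lemma pv_main (kwl : String) (ws : List String) (kw : String) (t : List String) (b : String)
    (hb : pvContains kwl b = false) :
    pvClean kwl ws kw t (some (b, pvScore ws b))
      = (match t.find? (pvContains kwl) with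
         | some l => l
         | none => (t.foldl (pvStepA (pvScore ws)) (b, pvScore ws b)).1) := by
  induction t generalizing b with
  | nil => rfl
  | cons x t ih =>
    by_cases hx : pvContains kwl x = true
    · rw [List.find?_cons_of_pos (p := pvContains kwl) hx]
      simp [pvClean, hx]
    · have hx' : pvContains kwl x = false := by revert hx; cases pvContains kwl x <;> simp
      rw [List.find?_cons_of_neg (p := pvContains kwl) hx]
      simp only [pvClean, hx', Bool.false_eq_true, if_false, List.foldl_cons, pvStepA]
      by_cases hlt : pvScore ws b < pvScore ws x
      · rw [if_pos hlt, if_pos hlt]; exact ih x hx'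
      · rw [if_neg hlt, if_neg hlt]; exact ih b hb

-- ===== VERDICT (by name: the statement is the Claim_ definition above) =====
theorem best_matching_line_py_spec : Claim_equal_best_matching_line_py := by
  intro keyword cell_text _
  unfold Spec_best_matching_line_py best_matching_line_py best_matching_line_py_alt
  rw [pv_bmlLoop_clean]
  cases hl : ((PySem.Str.splitlines cell_text).filter (fun l => PySem.Str.strip l ≠ "")).map PySem.Str.strip with
  | nil => rfl
  | cons l0 rest =>
    show (match (l0 :: rest).find? (pvContains (PySem.Str.lower keyword)) with
        | some line => line
        | none => ((l0 :: rest).foldl (pvStepA (pvScore (PySem.Str.split₀ (PySem.Str.lower keyword)))) (l0, 0)).1)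
      = pvClean (PySem.Str.lower keyword) (PySem.Str.split₀ (PySem.Str.lower keyword)) keyword (l0 :: rest) none
    by_cases hc : pvContains (PySem.Str.lower keyword) l0 = true
    · rw [List.find?_cons_of_pos (p := pvContains (PySem.Str.lower keyword)) hc]
      simp [pvClean, hc]
    · have hc' : pvContains (PySem.Str.lower keyword) l0 = false := by
        revert hc; cases pvContains (PySem.Str.lower keyword) l0 <;> simp
      rw [List.find?_cons_of_neg (p := pvContains (PySem.Str.lower keyword)) hc]
      simp only [pvClean, hc', Bool.false_eq_true, if_false, List.foldl_cons]
      have hinit : pvStepA (pvScore (PySem.Str.split₀ (PySem.Str.lower keyword))) (l0, 0) l0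
          = (l0, pvScore (PySem.Str.split₀ (PySem.Str.lower keyword)) l0) := by
        unfold pvStepA
        by_cases h : ((l0, (0 : Int)).2 : Int) < pvScore (PySem.Str.split₀ (PySem.Str.lower keyword)) l0
        · rw [if_pos h]
        · have h0 : pvScore (PySem.Str.split₀ (PySem.Str.lower keyword)) l0 = 0 := by
            have := pv_score_nonneg (PySem.Str.split₀ (PySem.Str.lower keyword)) l0
            simp at h; omega
          rw [if_neg h, h0]
      rw [hinit, pv_main _ _ _ rest l0 hc']
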